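-- pv_equiv track=rewrite | github.com/lee-jae-o/PythonStudy | study/study107.py | maximize_shopping_list
-- ===== SOURCE A (Python) =====
-- def maximize_shopping_list(items, budget):
--
--     items.sort(key=lambda x: x['price'])
--
--     purchased_items = []
--     total_spent = 0
--
--     for item in items:
--         if total_spent + item['price'] <= budget:
--             purchased_items.append(item)
--             total_spent += item['price']
--         else:
--             break
--
--     return purchased_items, total_spent
-- ===== SOURCE B (Python) =====
-- def maximize_shopping_list(items, budget):
--     # Selection instead of sorting: repeatedly extract the cheapest remaining
--     # item (ties broken by original position, matching a stable sort) while it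
--     # still fits in the budget.  Unlike A, the caller's list is NOT sorted in
--     # place; the return value is identical.
--     remaining = list(enumerate(items))
--     purchased = []
--     total = 0
--     while remaining:
--         cheapest = min(remaining, key=lambda p: (p[1]['price'], p[0]))
--         price = cheapest[1]['price']
--         if total + price > budget:
--             break
--         purchased.append(cheapest[1])
--         total += price
--         remaining.remove(cheapest)
--     return purchased, total
-- ===== Notes on version B (the rewrite author's own statement) =====
-- stated objective: alternative
-- what changed: Replaces sort-then-greedy-prefix by repeated cheapest-extraction: no sorting at all, B repeatedly selects (min with a (price, original index) key) and removes the cheapest remaining item while it fits the budget; B does not sort the caller's list in place (return value identical).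
-- outside the precondition, e.g. on maximize_shopping_list([{'name': 1}], 5): A raises KeyError, B raises KeyError
import Mathlib
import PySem

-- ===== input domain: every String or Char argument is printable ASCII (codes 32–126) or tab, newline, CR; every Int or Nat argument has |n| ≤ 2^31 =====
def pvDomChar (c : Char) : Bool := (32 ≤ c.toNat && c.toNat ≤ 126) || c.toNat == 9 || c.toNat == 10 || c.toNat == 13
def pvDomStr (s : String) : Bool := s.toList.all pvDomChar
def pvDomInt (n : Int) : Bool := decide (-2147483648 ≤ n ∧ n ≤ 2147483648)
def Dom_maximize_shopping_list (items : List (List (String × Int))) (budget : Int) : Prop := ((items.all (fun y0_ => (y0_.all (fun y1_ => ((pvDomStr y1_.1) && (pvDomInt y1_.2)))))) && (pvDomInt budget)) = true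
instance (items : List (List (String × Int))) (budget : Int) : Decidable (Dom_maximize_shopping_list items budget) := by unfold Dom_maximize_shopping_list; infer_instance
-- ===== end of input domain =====

-- B replaces A's sort-then-greedy-prefix by repeated cheapest-extraction: no sorting; B
-- repeatedly selects (min with a (price, original index) key) and removes the cheapest
-- remaining item while it fits the budget.  Side effect differs: A sorts the caller's list
-- in place, B leaves it untouched; the equivalence proved here is about the RETURN value.

-- item['price'] (exact under Pre_, which guarantees the key is present; Python raises KeyError otherwise)
def pvPrice (d : List (String × Int)) : Int := ((PySem.Dict.ofList d).get? "price").getD 0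

-- ===== PORT A =====
-- the for-loop over the sorted items, with acc = purchased_items (reversed) and spent = total_spent
def pvLoopA (budget : Int) : List (List (String × Int)) → List (List (String × Int)) → Int → (List (List (String × Int))) × Int
  | [], acc, spent => (acc.reverse, spent)
  | it :: rest, acc, spent =>
      if spent + pvPrice it ≤ budget then pvLoopA budget rest (it :: acc) (spent + pvPrice it)
      else (acc.reverse, spent)

def maximize_shopping_list (items : List (List (String × Int))) (budget : Int) : (List (List (String × Int))) × Int :=
  pvLoopA budget (PySem.List.sorted items (fun d => pvPrice d) false) [] 0

-- ===== PORT B =====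
-- fact used only for pvLoopB's termination: min(...) (min2?) returns an element of the list
-- (pvSelStep names min2?'s fold step for our concrete keys, so the fold can be reasoned about)
def pvSelStep (acc : Option (Int × List (String × Int))) (x : Int × List (String × Int)) : Option (Int × List (String × Int)) :=
  match acc with
  | none => some x
  | some m0 =>
    if (decide (pvPrice x.2 < pvPrice m0.2) || !decide (pvPrice m0.2 < pvPrice x.2) && decide (x.1 < m0.1)) = true
    then some x else some m0

theorem pv_min2_eq_fold (rem : List (Int × List (String × Int))) :
    PySem.List.min2? rem (fun p => pvPrice p.2) (fun p => p.1) = List.foldl pvSelStep none rem := by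
  unfold PySem.List.min2?
  congr 1
  funext acc x
  cases acc <;> simp [pvSelStep]

theorem pv_min2_mem (rem : List (Int × List (String × Int))) (m : Int × List (String × Int))
    (h : PySem.List.min2? rem (fun p => pvPrice p.2) (fun p => p.1) = some m) : m ∈ rem := by
  rw [pv_min2_eq_fold] at h
  have aux : ∀ (l : List (Int × List (String × Int))) (acc : Option (Int × List (String × Int))),
      List.foldl pvSelStep acc l = some m → acc = some m ∨ m ∈ l := by
    intro l
    induction l with
    | nil => intro acc h; exact Or.inl h
    | cons x t ih =>
      intro acc h
      rcases ih _ h with h' | h'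
      · cases acc with
        | none => simp [pvSelStep] at h'; right; simp [h']
        | some m0 =>
          simp only [pvSelStep] at h'
          split at h'
          · right; simp at h'; simp [h']
          · left; exact h'
      · right; exact List.mem_cons_of_mem _ h'
  rcases aux rem none h with h' | h'
  · simp at h'
  · exact h'

-- the while loop: extract the cheapest remaining (index, item) pair while it fits
def pvLoopB (budget : Int) (rem : List (Int × List (String × Int)))
    (acc : List (List (String × Int))) (total : Int) : (List (List (String × Int))) × Int :=
  match h : PySem.List.min2? rem (fun p => pvPrice p.2) (fun p => p.1) with
  | none => (acc.reverse, total)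
  | some m =>
      if budget < total + pvPrice m.2 then (acc.reverse, total)
      else pvLoopB budget ((PySem.List.remove? rem m).getD rem) (m.2 :: acc) (total + pvPrice m.2)
  termination_by rem.length
  decreasing_by
    have hm : m ∈ rem := pv_min2_mem rem m h
    rw [PySem.List.remove?_eq_some_erase rem m hm]
    simp only [Option.getD_some, List.length_erase_of_mem hm]
    exact Nat.sub_lt (List.length_pos_of_mem hm) Nat.one_pos

def maximize_shopping_list_alt (items : List (List (String × Int))) (budget : Int) : (List (List (String × Int))) × Int :=
  pvLoopB budget (PySem.List.enumerate items 0) [] 0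

-- ===== PRECONDITION & SPEC =====
-- Pre_ excludes exactly the items lacking a 'price' key, on which both Pythons raise KeyError.
def Pre_maximize_shopping_list (items : List (List (String × Int))) (budget : Int) : Prop :=
  ∀ it ∈ items, (it.map Prod.fst).contains "price" = true
instance (items : List (List (String × Int))) (budget : Int) : Decidable (Pre_maximize_shopping_list items budget) := by unfold Pre_maximize_shopping_list; infer_instance
def pvWitness_maximize_shopping_list : (List (List (String × Int))) × Int := ([[("price", 3)], [("price", 1)]], 4)

def Spec_maximize_shopping_list (items : List (List (String × Int))) (budget : Int) (out : (List (List (String × Int))) × Int) : Prop := out = maximize_shopping_list_alt items budget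
instance (items : List (List (String × Int))) (budget : Int) (out : (List (List (String × Int))) × Int) : Decidable (Spec_maximize_shopping_list items budget out) := by unfold Spec_maximize_shopping_list; infer_instance

-- ===== CLAIM (what is proved, stated in full; the proofs are below) =====
def Claim_equal_maximize_shopping_list : Prop := ∀ (items : List (List (String × Int))) (budget : Int), Dom_maximize_shopping_list items budget → Pre_maximize_shopping_list items budget → Spec_maximize_shopping_list items budget (maximize_shopping_list items budget)

-- ===== LEMMAS AND PROOFS =====

-- proof-side key: the lexicographic (price, index) order, encoded as a single Int
-- (exact for indices in [0, B))
def pvKey (B : Int) (p : Int × List (String × Int)) : Int := pvPrice p.2 * B + p.1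

theorem pv_K_lt_iff (B a b i j : Int) (hi : 0 ≤ i) (hi' : i < B) (hj : 0 ≤ j) (hj' : j < B) :
    a * B + i < b * B + j ↔ (a < b ∨ (a = b ∧ i < j)) := by
  constructor
  · intro h
    rcases lt_trichotomy a b with h' | h' | h'
    · exact Or.inl h'
    · subst h'; right; exact ⟨rfl, by linarith⟩
    · exfalso
      have : (b + 1) * B ≤ a * B := by
        have : b + 1 ≤ a := by omega
        exact mul_le_mul_of_nonneg_right this (by linarith)
      nlinarith
  · rintro (h' | ⟨rfl, h'⟩)
    · have : (a + 1) * B ≤ b * B := by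
        have : a + 1 ≤ b := by omega
        exact mul_le_mul_of_nonneg_right this (by linarith)
      nlinarith
    · linarith

theorem pv_lex_decide (B a b i j : Int) (hi : 0 ≤ i) (hi' : i < B) (hj : 0 ≤ j) (hj' : j < B) :
    (decide (a < b) || (!decide (b < a) && decide (i < j))) = decide (a * B + i < b * B + j) := by
  simp only [pv_K_lt_iff B a b i j hi hi' hj hj']
  rcases lt_trichotomy a b with h | h | h
  · simp [h]
  · subst h; simp
  · have h1 : ¬ a < b := by omega
    have h2 : a ≠ b := by omega
    simp [h1, h, h2]

theorem pv_K_inj (B a b i j : Int) (hi : 0 ≤ i) (hi' : i < B) (hj : 0 ≤ j) (hj' : j < B)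
    (h : a * B + i = b * B + j) : a = b ∧ i = j := by
  have h1 := pv_K_lt_iff B a b i j hi hi' hj hj'
  have h2 := pv_K_lt_iff B b a j i hj hj' hi hi'
  have hn1 : ¬ (a * B + i < b * B + j) := by omega
  have hn2 : ¬ (b * B + j < a * B + i) := by omega
  rw [h1] at hn1; rw [h2] at hn2
  constructor
  · omega
  · omega

-- min?'s fold step for the encoded key, named so the fold can be reasoned about
def pvSelStepK (B : Int) (acc : Option (Int × List (String × Int))) (x : Int × List (String × Int)) : Option (Int × List (String × Int)) :=
  match acc with
  | none => some x
  | some m0 => if pvKey B x < pvKey B m0 then some x else some m0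

theorem pv_minK_eq_fold (B : Int) (rem : List (Int × List (String × Int))) :
    PySem.List.min? rem (pvKey B) = List.foldl (pvSelStepK B) none rem := by
  unfold PySem.List.min?
  congr 1
  funext acc x
  cases acc <;> simp [pvSelStepK]

-- min2? with the (price, index) tuple key agrees with min? under the encoded key
theorem pv_min2_eq_minK (B : Int) (rem : List (Int × List (String × Int)))
    (hb : ∀ p ∈ rem, 0 ≤ p.1 ∧ p.1 < B) :
    PySem.List.min2? rem (fun p => pvPrice p.2) (fun p => p.1)
      = PySem.List.min? rem (pvKey B) := by
  rw [pv_min2_eq_fold, pv_minK_eq_fold]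
  have aux : ∀ (l : List (Int × List (String × Int))) (acc : Option (Int × List (String × Int))),
      (∀ p ∈ l, 0 ≤ p.1 ∧ p.1 < B) →
      (∀ m, acc = some m → 0 ≤ m.1 ∧ m.1 < B) →
      List.foldl pvSelStep acc l = List.foldl (pvSelStepK B) acc l := by
    intro l
    induction l with
    | nil => intro acc _ _; rfl
    | cons x t ih =>
      intro acc hl hacc
      have hx := hl x (List.mem_cons_self)
      simp only [List.foldl_cons]
      have hstep : pvSelStep acc x = pvSelStepK B acc x := by
        cases acc with
        | none => rfl
        | some m0 =>
          have hm0 := hacc m0 rfl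
          simp only [pvSelStep, pvSelStepK]
          rw [pv_lex_decide B (pvPrice x.2) (pvPrice m0.2) x.1 m0.1 hx.1 hx.2 hm0.1 hm0.2]
          simp [pvKey]
      rw [hstep]
      apply ih
      · intro p hp; exact hl p (List.mem_cons_of_mem _ hp)
      · intro m hm
        cases acc with
        | none => simp [pvSelStepK] at hm; subst hm; exact hx
        | some m0 =>
          simp only [pvSelStepK] at hm
          split at hm
          · simp at hm; subst hm; exact hx
          · simp at hm; subst hm; exact hacc m0 rfl
  exact aux rem none hb (by intro m h; simp at h)

-- under a duplicate-free key, sorted(xs) is the minimum followed by sorted of the rest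
theorem pv_sorted_min_cons (K : (Int × List (String × Int)) → Int)
    (rem : List (Int × List (String × Int))) (m : Int × List (String × Int))
    (hnd : (rem.map K).Nodup) (hm : PySem.List.min? rem K = some m) :
    PySem.List.sorted rem K false = m :: PySem.List.sorted (rem.erase m) K false := by
  have hmem : m ∈ rem := PySem.List.min?_mem hm
  have hndr : rem.Nodup := hnd.of_map
  have hforall : ∀ x ∈ rem, ∀ y ∈ rem, x ≠ y → K x ≠ K y := by
    have hpw : rem.Pairwise (fun a b => K a ≠ K b) := List.pairwise_map.mp hnd
    intro x hx y hy hxy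
    exact List.Pairwise.forall (fun a b h => h.symm) hpw hx hy hxy
  apply PySem.List.sorted_eq_of_perm_of_pairwise_lt
  · exact (((PySem.List.sorted_perm (rem.erase m) K false).cons m).trans (List.perm_cons_erase hmem).symm)
  · rw [List.pairwise_cons]
    constructor
    · intro y hy
      have hy' : y ∈ rem.erase m := (PySem.List.mem_sorted _ _ _ _).1 hy
      have hyr : y ∈ rem := List.mem_of_mem_erase hy'
      have hle : K m ≤ K y := PySem.List.min?_isMin hm y hyr
      have hne : y ≠ m := ((List.Nodup.mem_erase_iff hndr).1 hy').1
      exact lt_of_le_of_ne hle (hforall m hmem y hyr (fun h => hne h.symm) )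
    · have h1 : (PySem.List.sorted (rem.erase m) K false).Pairwise (fun a b => K a ≤ K b) :=
        PySem.List.sorted_pairwise _ _
      have hesub : ((rem.erase m).map K).Sublist (rem.map K) :=
        (List.erase_sublist : (rem.erase m).Sublist rem).map K
      have hnde : ((rem.erase m).map K).Nodup := hnd.sublist hesub
      have hperm : (PySem.List.sorted (rem.erase m) K false).Perm (rem.erase m) :=
        PySem.List.sorted_perm _ _ _
      have hnds : ((PySem.List.sorted (rem.erase m) K false).map K).Nodup :=
        ((hperm.map K).nodup_iff).2 hnde
      have h2 : (PySem.List.sorted (rem.erase m) K false).Pairwise (fun a b => K a ≠ K b) :=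
        List.pairwise_map.mp hnds
      exact (h1.and h2).imp (fun h => lt_of_le_of_ne h.1 h.2)

-- the extraction loop computes A's greedy loop over the K-sorted list
theorem pv_loopB_eq (budget B : Int) :
    ∀ (n : Nat) (rem : List (Int × List (String × Int)))
      (acc : List (List (String × Int))) (total : Int),
      rem.length ≤ n →
      (rem.map Prod.fst).Nodup →
      (∀ p ∈ rem, 0 ≤ p.1 ∧ p.1 < B) →
      pvLoopB budget rem acc total
        = pvLoopA budget ((PySem.List.sorted rem (pvKey B) false).map Prod.snd) acc total := by
  intro n
  induction n with
  | zero =>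
    intro rem acc total hlen _ _
    have : rem = [] := List.length_eq_zero_iff.1 (Nat.le_zero.1 hlen)
    subst this
    rw [pvLoopB]
    rfl
  | succ n ih =>
    intro rem acc total hlen hnd hb
    have hmk := pv_min2_eq_minK B rem hb
    rw [pvLoopB]
    split
    · next heq =>
      rw [hmk] at heq
      have : rem = [] := (PySem.List.min?_eq_none_iff _ _).1 heq
      subst this
      rfl
    · next m heq =>
      rw [hmk] at heq
      have hmem : m ∈ rem := PySem.List.min?_mem heq
      have hKnd : (rem.map (pvKey B)).Nodup := by
        have hndr : rem.Nodup := by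
          have := hnd.of_map
          exact this
        apply List.Nodup.map_on _ hndr
        intro x hx y hy hKxy
        have hxb := hb x hx
        have hyb := hb y hy
        have := pv_K_inj B (pvPrice x.2) (pvPrice y.2) x.1 y.1 hxb.1 hxb.2 hyb.1 hyb.2 hKxy
        by_contra hne
        have hfne : x.1 ≠ y.1 := by
          have hpw : rem.Pairwise (fun a b => a.1 ≠ b.1) := List.pairwise_map.mp hnd
          exact List.Pairwise.forall (fun a b h => h.symm) hpw hx hy hne
        exact hfne this.2
      rw [pv_sorted_min_cons (pvKey B) rem m hKnd heq]
      rw [List.map_cons, pvLoopA]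
      by_cases hfit : total + pvPrice m.2 ≤ budget
      · rw [if_neg (by omega), if_pos hfit]
        rw [PySem.List.remove?_eq_some_erase rem m hmem]
        simp only [Option.getD_some]
        apply ih
        · have := List.length_erase_of_mem hmem
          omega
        · exact hnd.sublist ((List.erase_sublist : (rem.erase m).Sublist rem).map Prod.fst)
        · intro p hp; exact hb p (List.mem_of_mem_erase hp)
      · rw [if_pos (by omega), if_neg hfit]

-- generic: map commutes with insertBy when the orderings agree on the elements present
theorem pv_map_insertBy {α β : Type} (f : α → β) (bl : α → α → Bool) (b : β → β → Bool) (x : α) :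
    ∀ (P : List α), (∀ p ∈ P, bl x p = b (f x) (f p)) →
      (PySem.List.insertBy bl x P).map f = PySem.List.insertBy b (f x) (P.map f) := by
  intro P
  induction P with
  | nil => intro _; rfl
  | cons y ys ih =>
    intro h
    have hy := h y (List.mem_cons_self)
    rw [PySem.List.insertBy, List.map_cons, PySem.List.insertBy, ← hy]
    by_cases hc : bl x y = true
    · rw [if_pos hc, if_pos hc]; rfl
    · rw [if_neg hc, if_neg hc, List.map_cons]
      rw [ih (fun p hp => h p (List.mem_cons_of_mem _ hp))]

-- stability bridge: insertion sort of the enumerated list under the encoded lexicographic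
-- key projects to insertion sort of the items under the price key
theorem pv_bridge_aux (B : Int) :
    ∀ (xs : List (List (String × Int))) (s : Int) (P : List (Int × List (String × Int))),
      0 ≤ s → s + xs.length ≤ B → (∀ p ∈ P, 0 ≤ p.1 ∧ p.1 < s) →
      (List.foldl (fun acc x => PySem.List.insertBy (fun a b => decide (pvKey B a < pvKey B b)) x acc) P
          (PySem.List.enumerate xs s)).map Prod.snd
        = List.foldl (fun acc x => PySem.List.insertBy (fun a b => decide (pvPrice a < pvPrice b)) x acc)
            (P.map Prod.snd) xs := by
  intro xs
  induction xs with
  | nil => intro s P _ _ _; simp [PySem.List.enumerate_nil]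
  | cons x t ih =>
    intro s P hs hB hP
    rw [PySem.List.enumerate_cons, List.foldl_cons, List.foldl_cons]
    have hmap : (PySem.List.insertBy (fun a b => decide (pvKey B a < pvKey B b)) (s, x) P).map Prod.snd
        = PySem.List.insertBy (fun a b => decide (pvPrice a < pvPrice b)) x (P.map Prod.snd) := by
      apply pv_map_insertBy
      intro p hp
      have hpb := hP p hp
      have hsB : s < B := by
        have : (0:Int) ≤ t.length := by positivity
        simp only [List.length_cons] at hB
        push_cast at hB
        omega
      simp only [pvKey]
      simp only [pv_K_lt_iff B (pvPrice x) (pvPrice p.2) s p.1 hs hsB hpb.1 (by omega)]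
      by_cases hc : pvPrice x < pvPrice p.2
      · simp [hc]
      · simp [hc]
        omega
    rw [← hmap]
    apply ih (s + 1)
    · omega
    · simp only [List.length_cons] at hB; push_cast at hB ⊢; omega
    · intro p hp
      rcases (PySem.List.insertBy_mem_iff _ _ _ _).1 hp with h | h
      · subst h; exact ⟨hs, by omega⟩
      · have := hP p h; omega

theorem pv_bridge (items : List (List (String × Int))) :
    (PySem.List.sorted (PySem.List.enumerate items 0) (pvKey (items.length : Int)) false).map Prod.snd
      = PySem.List.sorted items (fun d => pvPrice d) false := by
  rw [PySem.List.sorted_eq_foldl_insertBy, PySem.List.sorted_eq_foldl_insertBy]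
  exact pv_bridge_aux (items.length : Int) items 0 [] le_rfl (by simp) (by simp)

-- ===== VERDICT (by name: the statement is the Claim_ definition above) =====
theorem maximize_shopping_list_spec : Claim_equal_maximize_shopping_list := by
  intro items budget _ _
  unfold Spec_maximize_shopping_list maximize_shopping_list maximize_shopping_list_alt
  rw [pv_loopB_eq budget (items.length : Int) (PySem.List.enumerate items 0).length
      (PySem.List.enumerate items 0) [] 0 le_rfl]
  · rw [pv_bridge]
  · rw [show List.map (fun x => x.1) (PySem.List.enumerate items 0) = PySem.List.pyRange 0 (0 + items.length)
        from PySem.List.map_fst_enumerate items 0]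
    exact PySem.List.nodup_pyRange_one _ _
  · intro p hp
    have h1 : p.1 ∈ List.map (fun x => x.1) (PySem.List.enumerate items 0) := List.mem_map_of_mem hp
    rw [PySem.List.map_fst_enumerate items 0] at h1
    have := (PySem.List.mem_pyRange_one).1 h1
    omega
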